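-- pv_equiv track=rewrite | github.com/s23578-pj/ASDProject2 | huffman.py | make_up_to_eightBIT
-- ===== SOURCE A (Python) =====
-- def make_up_to_eightBIT(bin_input):
--     # dopełnienie wartości binarnych do ośmiu (ze względu na tabelę ASCI, która ma 8 znaków)
--     index = 1
--     counter = 0
--     result_list = list()
--     sign = ''
--     for i in bin_input:
--         sign += i
--         counter += 1
--         if counter == 7 and len(sign) == 7:
--             sign = '0' + sign
--             result_list.append(sign)
--             sign = ''
--             counter = 0
--         elif len(sign) != 7 and index == len(bin_input):
--             sign = ((8-counter) * '0') + sign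
--             result_list.append(sign)
--             sign = ''
--         index += 1
--     return result_list
-- ===== SOURCE B (Python) =====
-- def make_up_to_eightBIT(bin_input):
--     # slice off 7-char chunks and left-pad each to 8 bits with one formula
--     result = []
--     for i in range(0, len(bin_input), 7):
--         chunk = bin_input[i:i + 7]
--         result.append('0' * (8 - len(chunk)) + chunk)
--     return result
-- ===== Notes on version B (the rewrite author's own statement) =====
-- stated objective: simpler
-- what changed: Replaces the character-by-character accumulator with index/counter/sign bookkeeping and two emit branches by slicing the input into 7-char chunks with a stride-7 range and left-padding each chunk to 8 with one formula.
import Mathlib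
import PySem

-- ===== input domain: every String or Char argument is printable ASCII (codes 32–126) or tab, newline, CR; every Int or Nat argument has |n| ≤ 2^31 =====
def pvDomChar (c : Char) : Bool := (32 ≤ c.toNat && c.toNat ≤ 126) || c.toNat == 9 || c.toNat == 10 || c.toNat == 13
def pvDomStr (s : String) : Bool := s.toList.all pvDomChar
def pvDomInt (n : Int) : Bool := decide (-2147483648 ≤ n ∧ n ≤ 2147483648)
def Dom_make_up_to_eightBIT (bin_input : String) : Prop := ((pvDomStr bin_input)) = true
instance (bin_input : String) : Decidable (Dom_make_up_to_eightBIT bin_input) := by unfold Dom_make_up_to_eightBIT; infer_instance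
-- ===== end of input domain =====

-- B replaces A's char-by-char accumulator (index/counter/sign bookkeeping, two emit branches)
-- by a stride-7 range of slices, each left-padded to 8 with one formula; objective: simpler.

-- ===== PORT A =====
-- loop state: remaining chars, index, counter, result_list, sign; n = len(bin_input)
def pvAGo : List Char → Nat → Nat → List String → List Char → Nat → List String
  | [], _, _, res, _, _ => res
  | c :: rest, index, counter, res, sign, n =>
    let sign1 := sign ++ [c]
    let counter1 := counter + 1
    if counter1 = 7 ∧ sign1.length = 7 then
      pvAGo rest (index + 1) 0 (res ++ [String.ofList ('0' :: sign1)]) [] n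
    else if sign1.length ≠ 7 ∧ index = n then
      pvAGo rest (index + 1) counter1 (res ++ [String.ofList (List.replicate (8 - counter1) '0' ++ sign1)]) [] n
    else
      pvAGo rest (index + 1) counter1 res sign1 n

def make_up_to_eightBIT (bin_input : String) : List String :=
  pvAGo bin_input.toList 1 0 [] [] bin_input.toList.length

-- ===== PORT B =====
-- Source B: for i in range(0, len(bin_input), 7): chunk = bin_input[i:i+7]; append pad + chunk
def make_up_to_eightBIT_alt (bin_input : String) : List String :=
  (PySem.List.pyRange 0 bin_input.toList.length 7).map (fun i =>
    let chunk := PySem.List.slice bin_input.toList (some i) (some (i + 7))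
    String.ofList (List.replicate (8 - chunk.length) '0' ++ chunk))

-- ===== PRECONDITION & SPEC =====
def Spec_make_up_to_eightBIT (bin_input : String) (out : List String) : Prop := out = make_up_to_eightBIT_alt bin_input
instance (bin_input : String) (out : List String) : Decidable (Spec_make_up_to_eightBIT bin_input out) := by unfold Spec_make_up_to_eightBIT; infer_instance

-- ===== CLAIM (what is proved, stated in full; the proofs are below) =====
def Claim_equal_make_up_to_eightBIT : Prop := ∀ (bin_input : String), Dom_make_up_to_eightBIT bin_input → Spec_make_up_to_eightBIT bin_input (make_up_to_eightBIT bin_input)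

-- ===== LEMMAS AND PROOFS =====

-- proof-only midpoint: the padded 7-chunks of a character list, by recursion on chunks
def pvChunks : List Char → List String
  | [] => []
  | c :: rest =>
    String.ofList (List.replicate (8 - ((c :: rest).take 7).length) '0' ++ (c :: rest).take 7) :: pvChunks (rest.drop 6)
termination_by l => l.length
decreasing_by simp [List.length_drop]

lemma pvChunks_nil : pvChunks [] = [] := by rw [pvChunks]

-- one-step unfolding of pvChunks on a nonempty list, phrased via take/drop of the whole list
lemma pvChunks_eq (l : List Char) (h : l ≠ []) :
    pvChunks l =
      String.ofList (List.replicate (8 - (l.take 7).length) '0' ++ l.take 7) :: pvChunks (l.drop 7) := by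
  cases l with
  | nil => exact absurd rfl h
  | cons c rest => rw [pvChunks]; simp

-- A-side invariant: with `sign` the current partial chunk (< 7 chars, empty once the input is
-- exhausted) and index = n - |l| + 1, A's loop appends exactly the padded 7-chunks of sign ++ l.
lemma pvKey (l : List Char) : ∀ (sign : List Char) (res : List String) (n : Nat),
    sign.length < 7 → (l = [] → sign = []) → l.length ≤ n →
    pvAGo l (n - l.length + 1) sign.length res sign n = res ++ pvChunks (sign ++ l) := by
  induction l with
  | nil =>
    intro sign res n _ hempty _
    simp [pvAGo, hempty rfl, pvChunks_nil]
  | cons c rest ih =>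
    intro sign res n h7 _ hlen
    simp only [pvAGo]
    by_cases h6 : sign.length = 6
    · -- chunk completes: counter == 7 and len(sign) == 7
      have hcond : sign.length + 1 = 7 ∧ (sign ++ [c]).length = 7 := by simp [h6]
      rw [if_pos hcond]
      have hidx : n - (c :: rest).length + 1 + 1 = n - rest.length + 1 := by
        simp at hlen ⊢; omega
      rw [hidx]
      have hrec := ih [] (res ++ [String.ofList ('0' :: (sign ++ [c]))]) n (by simp)
        (fun _ => rfl) (by simp at hlen ⊢; omega)
      simp only [List.length_nil, List.nil_append] at hrec
      rw [hrec]
      have htake : (sign ++ c :: rest).take 7 = sign ++ [c] := by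
        rw [List.take_append]
        simp [h6]
      have hdrop : (sign ++ c :: rest).drop 7 = rest := by
        rw [List.drop_append]
        simp [h6]
      rw [pvChunks_eq (sign ++ c :: rest) (by simp), htake, hdrop]
      have h7' : (sign ++ [c]).length = 7 := by simp [h6]
      rw [h7']
      simp
    · -- counter1 ≠ 7
      have hcond : ¬ (sign.length + 1 = 7 ∧ (sign ++ [c]).length = 7) := by
        simp; omega
      rw [if_neg hcond]
      by_cases hlast : rest = []
      · -- last character: the elif pads the final partial chunk
        subst hlast
        have hidx : n - (c :: ([] : List Char)).length + 1 = n := by simp at hlen ⊢; omega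
        have hcond2 : (sign ++ [c]).length ≠ 7 ∧ n - (c :: ([] : List Char)).length + 1 = n :=
          ⟨by simp; omega, hidx⟩
        rw [if_pos hcond2]
        simp only [pvAGo]
        have hslen : (sign ++ [c]).length ≤ 7 := by rw [List.length_append]; simp; omega
        have htake : (sign ++ [c]).take 7 = sign ++ [c] := List.take_of_length_le hslen
        have hdrop : (sign ++ [c]).drop 7 = [] := List.drop_eq_nil_of_le hslen
        rw [pvChunks_eq (sign ++ [c]) (by simp), htake, hdrop]
        have h1 : (sign ++ [c]).length = sign.length + 1 := by simp
        rw [h1]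
        simp [pvChunks_nil]
      · -- middle of a chunk: keep accumulating
        have hcond2 : ¬ ((sign ++ [c]).length ≠ 7 ∧ n - (c :: rest).length + 1 = n) := by
          have hr : rest.length ≠ 0 := by simpa using (List.length_pos_iff.mpr hlast).ne'
          simp at hlen ⊢
          intro _; omega
        rw [if_neg hcond2]
        have hidx : n - (c :: rest).length + 1 + 1 = n - rest.length + 1 := by
          simp at hlen ⊢; omega
        have hslen : (sign ++ [c]).length = sign.length + 1 := by simp
        rw [hidx, ← hslen]
        have hrec := ih (sign ++ [c]) res n (by rw [hslen]; omega)
          (fun h => absurd h hlast) (by simp at hlen ⊢; omega)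
        rw [hrec]
        simp

-- number of 7-chunks of a list of length n
def pvCnt (n : Nat) : Nat := (((n : Int) + 6) / 7).toNat

lemma pvCnt_zero : pvCnt 0 = 0 := by simp [pvCnt]

lemma pvCnt_succ (n : Nat) (h : 1 ≤ n) : pvCnt n = pvCnt (n - 7) + 1 := by
  unfold pvCnt
  omega

-- B-side: the stride-7 range of drop/take slices computes the chunk recursion
lemma pvRangeChunks (N : Nat) : ∀ (l : List Char), l.length ≤ N →
    (List.range (pvCnt l.length)).map (fun k =>
      String.ofList (List.replicate (8 - ((l.drop (7 * k)).take 7).length) '0' ++ (l.drop (7 * k)).take 7))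
      = pvChunks l := by
  induction N with
  | zero =>
    intro l hl
    have : l = [] := List.eq_nil_of_length_eq_zero (by omega)
    subst this
    simp [pvCnt_zero, pvChunks_nil]
  | succ N ih =>
    intro l hl
    cases hl0 : l with
    | nil => simp [pvCnt_zero, pvChunks_nil]
    | cons c rest =>
      rw [← hl0]
      have hne : l ≠ [] := by rw [hl0]; simp
      have h1 : 1 ≤ l.length := by rw [hl0]; simp
      rw [pvCnt_succ l.length h1]
      rw [List.range_succ_eq_map, List.map_cons, List.map_map]
      have hlen7 : (l.drop 7).length = l.length - 7 := by simp
      have hrec := ih (l.drop 7) (by rw [hlen7]; omega)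
      rw [hlen7] at hrec
      rw [pvChunks_eq l hne]
      refine congrArg₂ List.cons (by simp) ?_
      have hfun : ((fun k => String.ofList (List.replicate (8 - ((l.drop (7 * k)).take 7).length) '0'
            ++ (l.drop (7 * k)).take 7)) ∘ Nat.succ)
          = (fun k => String.ofList (List.replicate (8 - (((l.drop 7).drop (7 * k)).take 7).length) '0'
            ++ ((l.drop 7).drop (7 * k)).take 7)) := by
        funext k
        have hd : (l.drop 7).drop (7 * k) = l.drop (7 * (k + 1)) := by
          rw [List.drop_drop]; ring_nf
        simp [Function.comp, hd]
      rw [hfun, hrec]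

-- ===== VERDICT (by name: the statement is the Claim_ definition above) =====
theorem make_up_to_eightBIT_spec : Claim_equal_make_up_to_eightBIT := by
  intro s _
  unfold Spec_make_up_to_eightBIT make_up_to_eightBIT make_up_to_eightBIT_alt
  -- A side
  have hA := pvKey s.toList [] [] s.toList.length (by simp) (fun _ => rfl) le_rfl
  simp only [List.length_nil, Nat.sub_self, List.nil_append] at hA
  have hA' : pvAGo s.toList 1 0 [] [] s.toList.length = pvChunks s.toList := by
    have h01 : s.toList.length - s.toList.length + 1 = 1 := by omega
    rw [← h01]
    simpa using hA
  rw [hA']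
  -- B side
  rw [PySem.List.pyRange_of_pos 0 s.toList.length (by norm_num)]
  have hcnt : (if (0 : Int) < s.toList.length then
        (((s.toList.length : Int) - 0 + 7 - 1) / 7).toNat else 0) = pvCnt s.toList.length := by
    unfold pvCnt
    split <;> omega
  rw [hcnt, List.map_map]
  have hpt : ∀ (k : Nat),
      ((fun i => String.ofList (List.replicate
          (8 - (PySem.List.slice s.toList (some i) (some (i + 7))).length) '0'
          ++ PySem.List.slice s.toList (some i) (some (i + 7)))) ∘ (fun k : Nat => (0 : Int) + 7 * k)) k
        = String.ofList (List.replicate (8 - ((s.toList.drop (7 * k)).take 7).length) '0'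
            ++ (s.toList.drop (7 * k)).take 7) := by
    intro k
    have h0 : (0 : Int) + 7 * (k : Int) = ((7 * k : Nat) : Int) := by push_cast; ring
    have h7 : ((7 * k : Nat) : Int) + 7 = ((7 * k : Nat) : Int) + ((7 : Nat) : Int) := by norm_num
    simp only [Function.comp, h0, h7, PySem.List.slice_natCast_add]
  rw [funext hpt, pvRangeChunks s.toList.length s.toList le_rfl]
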